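-- pv_equiv track=rewrite | github.com/proxophy/AdventOfCode | practice2020/Day6.py | analysize_group_every
-- ===== SOURCE A (Python) =====
-- from collections import Counter
--
-- def analysize_group_every(group):
--     members =  group.split("\n")
--     if  len(members) == 1:
--         return len(members[0])
--
--     common = Counter(members[0])
--     for i in range(1, len(members)):
--         common = common & Counter(members[i])
--         if len(common) == 0:
--             return 0
--
--     return len(common)
-- ===== SOURCE B (Python) =====
-- def analysize_group_every(group):
--     members = group.split("\n")
--     if len(members) == 1:
--         return len(members[0])
--     return sum(1 for c in set(members[0]) if all(c in m for m in members[1:]))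
-- ===== Notes on version B (the rewrite author's own statement) =====
-- stated objective: simpler
-- what changed: Replaces Counter building and repeated Counter intersection with a direct count of the distinct characters of the first member that occur in every other member (membership scans, no frequency tables).
import Mathlib
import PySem

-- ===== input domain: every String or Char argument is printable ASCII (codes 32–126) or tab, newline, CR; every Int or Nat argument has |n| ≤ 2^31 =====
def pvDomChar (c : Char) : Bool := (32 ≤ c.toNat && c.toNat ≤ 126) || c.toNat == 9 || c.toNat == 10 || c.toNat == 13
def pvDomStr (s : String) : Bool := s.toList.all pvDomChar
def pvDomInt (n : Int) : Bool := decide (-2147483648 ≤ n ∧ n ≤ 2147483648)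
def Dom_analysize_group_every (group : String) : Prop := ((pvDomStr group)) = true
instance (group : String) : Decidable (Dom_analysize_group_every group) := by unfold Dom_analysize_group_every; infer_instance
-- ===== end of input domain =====

-- B counts, by plain membership scans, the distinct characters of the first member present in
-- every other member, instead of A's Counter tables intersected pairwise (objective: simpler).

-- ===== PORT A =====
-- Counter & Counter exactly as CPython: iterate the left counter's items in order,
-- take the min with the right counter's count, keep only positive results.
def pvCounterAnd (d1 d2 : PySem.Dict Char Int) : PySem.Dict Char Int :=
  PySem.Dict.mk (d1.items.filterMap (fun p =>
    let n := min p.2 (d2.getD p.1 0)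
    if 0 < n then some (p.1, n) else none))

-- the 'for i in range(1, len(members))' loop of A, with its early 'return 0'
def pvLoopA (common : PySem.Dict Char Int) : List (List Char) → Int
  | [] => (common.items.length : Int)
  | m :: rest =>
    let c2 := pvCounterAnd common (PySem.Dict.counter m)
    if c2.items.length = 0 then 0 else pvLoopA c2 rest

def analysize_group_every (group : String) : Int :=
  let members := PySem.Chars.splitOn group.toList "\n".toList
  if members.length = 1 then ((members.headD []).length : Int)
  else pvLoopA (PySem.Dict.counter (members.headD [])) members.tail

-- ===== PORT B =====
def analysize_group_every_alt (group : String) : Int :=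
  let members := PySem.Chars.splitOn group.toList "\n".toList
  if members.length = 1 then ((members.headD []).length : Int)
  else (((PySem.Set.ofList (members.headD [])).filter
      (fun c => members.tail.all (fun m => PySem.Chars.isIn [c] m))).length : Int)

-- ===== PRECONDITION & SPEC =====
def Spec_analysize_group_every (group : String) (out : Int) : Prop := out = analysize_group_every_alt group
instance (group : String) (out : Int) : Decidable (Spec_analysize_group_every group out) := by unfold Spec_analysize_group_every; infer_instance

-- ===== CLAIM (what is proved, stated in full; the proofs are below) =====
def Claim_equal_analysize_group_every : Prop := ∀ (group : String), Dom_analysize_group_every group → Spec_analysize_group_every group (analysize_group_every group)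

-- ===== LEMMAS AND PROOFS =====

lemma pv_isIn_single (c : Char) (m : List Char) :
    PySem.Chars.isIn [c] m = m.contains c := by
  rw [Bool.eq_iff_iff, PySem.Chars.isIn_iff_infix, List.contains_iff_mem]
  exact List.singleton_infix_iff c m

-- one intersection step, on the items list
lemma pv_counterAnd_items (m : List Char) (L : List (Char × Int))
    (hpos : ∀ p ∈ L, 0 < p.2) :
    L.filterMap (fun p =>
        let n := min p.2 ((PySem.Dict.counter m).getD p.1 0)
        if 0 < n then some (p.1, n) else none)
      = (L.filter (fun p => m.contains p.1)).map
          (fun p => (p.1, min p.2 ((m.count p.1 : Int)))) := by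
  have hfun : (fun p : Char × Int =>
      let n := min p.2 ((PySem.Dict.counter m).getD p.1 0)
      if 0 < n then some (p.1, n) else none)
      = fun p : Char × Int =>
          if 0 < p.2 ∧ p.1 ∈ m then some (p.1, min p.2 ((m.count p.1 : Int))) else none := by
    funext p
    simp only [PySem.Dict.getD_counter, lt_min_iff]
    have : (0:Int) < (m.count p.1 : Int) ↔ p.1 ∈ m := by
      rw [Int.natCast_pos, List.count_pos_iff]
    simp
  rw [hfun]
  induction L with
  | nil => rfl
  | cons p L ih =>
    have hp : 0 < p.2 := hpos p (by simp)
    have hrec := ih (fun q hq => hpos q (by simp [hq]))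
    by_cases hm : p.1 ∈ m
    · simp [List.filter_cons, hm, hp, hrec]
    · simp [hm, hrec]

-- the loop computes the number of surviving keys present in every remaining member
lemma pv_loopA_eq (rest : List (List Char)) :
    ∀ common : PySem.Dict Char Int, (∀ p ∈ common.items, 0 < p.2) →
    pvLoopA common rest =
      (((common.items.map Prod.fst).filter
        (fun c => rest.all (fun m => PySem.Chars.isIn [c] m))).length : Int) := by
  induction rest with
  | nil =>
    intro common _
    simp [pvLoopA]
  | cons m rest ih =>
    intro common hpos
    have hitems : (pvCounterAnd common (PySem.Dict.counter m)).items
        = (common.items.filter (fun p => m.contains p.1)).map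
            (fun p => (p.1, min p.2 ((m.count p.1 : Int)))) := by
      simpa [pvCounterAnd] using pv_counterAnd_items m common.items hpos
    have hkeys : (pvCounterAnd common (PySem.Dict.counter m)).items.map Prod.fst
        = (common.items.map Prod.fst).filter (fun c => m.contains c) := by
      rw [hitems, List.filter_map]
      simp [Function.comp_def]
    by_cases h0 : (pvCounterAnd common (PySem.Dict.counter m)).items.length = 0
    · have hnil : (common.items.map Prod.fst).filter (fun c => m.contains c) = [] := by
        rw [← hkeys]
        simpa using List.length_eq_zero_iff.mp (by simpa using h0)
      have : ((common.items.map Prod.fst).filter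
          (fun c => (m :: rest).all (fun m' => PySem.Chars.isIn [c] m'))) = [] := by
        apply List.eq_nil_of_subset_nil
        intro c hc
        rw [← hnil]
        simp only [List.mem_filter, List.all_cons, Bool.and_eq_true, pv_isIn_single] at hc ⊢
        exact ⟨hc.1, hc.2.1⟩
      simp only [pvLoopA]
      rw [if_pos h0, this]
      simp
    · have hpos2 : ∀ p ∈ (pvCounterAnd common (PySem.Dict.counter m)).items, 0 < p.2 := by
        intro p hp
        rw [hitems] at hp
        obtain ⟨q, hq, rfl⟩ := List.mem_map.mp hp
        have hq' := List.mem_filter.mp hq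
        have hqm : q.1 ∈ m := List.contains_iff_mem.mp hq'.2
        exact lt_min (hpos q hq'.1) (by exact_mod_cast List.count_pos_iff.mpr hqm)
      simp only [pvLoopA]
      rw [if_neg h0, ih _ hpos2, hkeys, List.filter_filter]
      congr 2
      apply List.filter_congr
      intro c _
      simp [pv_isIn_single, Bool.and_comm]

lemma pv_counter_items_pos (m : List Char) :
    ∀ p ∈ (PySem.Dict.counter m).items, (0:Int) < p.2 := by
  intro p hp
  rw [PySem.Dict.items_counter] at hp
  obtain ⟨k, hk, rfl⟩ := List.mem_map.mp hp
  have hkm : k ∈ m := (PySem.Set.mem_ofList m k).mp hk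
  simpa using List.count_pos_iff.mpr hkm

-- ===== VERDICT (by name: the statement is the Claim_ definition above) =====
theorem analysize_group_every_spec : Claim_equal_analysize_group_every := by
  intro group _
  unfold Spec_analysize_group_every analysize_group_every analysize_group_every_alt
  set members := PySem.Chars.splitOn group.toList "\n".toList with hmem
  by_cases h1 : members.length = 1
  · simp [h1]
  · rw [if_neg h1, if_neg h1,
      pv_loopA_eq members.tail _ (pv_counter_items_pos (members.headD []))]
    congr 2
    rw [PySem.Dict.items_counter, List.map_map]
    simp [Function.comp_def]
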